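-- pv_equiv track=rewrite | github.com/RunningPig0820/aiEduPlatformModel | edukg/core/llm_inference/prerequisite_inferer.py | extract_from_definition
-- ===== SOURCE A (Python) =====
-- from typing import Dict, List, Any, Optional
--
-- def extract_from_definition(
--
--     definition: str,
--     kp_names: List[str],
--     min_length: int = 3
-- ) -> List[str]:
--     """
--     从定义文本中匹配知识点名称
--
--     Args:
--         definition: 知识点定义文本
--         kp_names: 已知知识点名称列表
--         min_length: 最小匹配长度（过滤太短的名称）
--
--     Returns:
--         匹配到的知识点名称列表
--     """
--     if not definition or not kp_names:
--         return []
--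
--     matched = []
--     definition_lower = definition.lower()
--
--     for name in kp_names:
--         # 过滤太短的名称
--         if len(name) < min_length:
--             continue
--
--         # 检查是否出现在定义中
--         if name.lower() in definition_lower:
--             matched.append(name)
--
--     return matched
-- ===== SOURCE B (Python) =====
-- from typing import List
--
-- def extract_from_definition(
--     definition: str,
--     kp_names: List[str],
--     min_length: int = 3
-- ) -> List[str]:
--     if not definition or not kp_names:
--         return []
--     d = definition.lower()
--     # lengths of eligible names, then index every substring of the definition
--     # having one of those lengths into a hash set: one membership probe per name.
--     lens = {len(n) for n in kp_names if len(n) >= min_length}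
--     subs = {d[i:i + L] for L in lens for i in range(len(d) - L + 1)}
--     return [n for n in kp_names if len(n) >= min_length and n.lower() in subs]
-- ===== Notes on version B (the rewrite author's own statement) =====
-- stated objective: alternative
-- what changed: B replaces A's per-name substring scan of the definition with one precomputed hash set of all definition substrings whose lengths occur among the eligible names, then filters names by a single set-membership probe each.
import Mathlib
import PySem

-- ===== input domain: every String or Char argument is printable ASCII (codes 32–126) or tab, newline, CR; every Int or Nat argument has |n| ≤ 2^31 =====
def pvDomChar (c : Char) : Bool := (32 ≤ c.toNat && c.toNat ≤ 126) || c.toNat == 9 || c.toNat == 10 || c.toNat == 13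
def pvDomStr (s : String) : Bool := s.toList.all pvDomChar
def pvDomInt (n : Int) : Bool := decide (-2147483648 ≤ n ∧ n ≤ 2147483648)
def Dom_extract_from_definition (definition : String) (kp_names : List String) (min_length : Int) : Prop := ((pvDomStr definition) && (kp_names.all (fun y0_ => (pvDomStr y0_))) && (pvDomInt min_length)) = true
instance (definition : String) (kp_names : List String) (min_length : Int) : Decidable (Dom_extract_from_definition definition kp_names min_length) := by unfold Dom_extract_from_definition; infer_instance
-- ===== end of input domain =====

-- B indexes every definition substring of a relevant length into a hash set once, replacing A's per-name substring scan (objective: alternative).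


-- ===== PORT A =====
def extract_from_definition (definition : String) (kp_names : List String) (min_length : Int) : List String :=
  if definition.toList = [] ∨ kp_names = [] then []
  else
    let definition_lower := PySem.Chars.lower definition.toList
    kp_names.foldl (fun matched name =>
      if ((name.toList.length : Int) < min_length) then matched
      else if PySem.Chars.isIn (PySem.Chars.lower name.toList) definition_lower then matched ++ [name]
      else matched) []

-- ===== PORT B =====
def extract_from_definition_alt (definition : String) (kp_names : List String) (min_length : Int) : List String :=
  if definition.toList = [] ∨ kp_names = [] then []
  else
    let d := PySem.Chars.lower definition.toList
    let lens : PySem.Set Nat := PySem.Set.ofList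
      ((kp_names.filter (fun n => min_length ≤ (n.toList.length : Int))).map (fun n => n.toList.length))
    let subs : PySem.Set (List Char) := PySem.Set.ofList
      (lens.flatMap (fun L => (List.range (d.length - L + 1)).map (fun i => (d.drop i).take L)))
    kp_names.filter (fun n => decide (min_length ≤ (n.toList.length : Int)) && PySem.Set.contains subs (PySem.Chars.lower n.toList))

-- ===== PRECONDITION & SPEC =====
def Spec_extract_from_definition (definition : String) (kp_names : List String) (min_length : Int) (out : List String) : Prop := out = extract_from_definition_alt definition kp_names min_length
instance (definition : String) (kp_names : List String) (min_length : Int) (out : List String) : Decidable (Spec_extract_from_definition definition kp_names min_length out) := by unfold Spec_extract_from_definition; infer_instance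

-- ===== CLAIM (what is proved, stated in full; the proofs are below) =====
def Claim_equal_extract_from_definition : Prop := ∀ (definition : String) (kp_names : List String) (min_length : Int), Dom_extract_from_definition definition kp_names min_length → Spec_extract_from_definition definition kp_names min_length (extract_from_definition definition kp_names min_length)

-- ===== LEMMAS AND PROOFS =====

-- A's append-only accumulator loop is the filter by "long enough and occurs in the lowered definition".
theorem extract_foldl_eq_filter (d : List Char) (min_length : Int) :
    ∀ (l : List String) (acc : List String),
      l.foldl (fun matched name =>
        if ((name.toList.length : Int) < min_length) then matched
        else if PySem.Chars.isIn (PySem.Chars.lower name.toList) d then matched ++ [name]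
        else matched) acc
      = acc ++ l.filter (fun n =>
          decide (min_length ≤ (n.toList.length : Int)) && PySem.Chars.isIn (PySem.Chars.lower n.toList) d) := by
  intro l
  induction l with
  | nil => intro acc; simp only [List.foldl_nil, List.filter_nil, List.append_nil]
  | cons n l ih =>
    intro acc
    simp only [List.foldl_cons, List.filter_cons]
    by_cases h1 : ((n.toList.length : Int) < min_length)
    · rw [if_pos h1, ih]
      have hfac : (decide (min_length ≤ (n.toList.length : Int)) &&
          PySem.Chars.isIn (PySem.Chars.lower n.toList) d) = false := by
        have : decide (min_length ≤ (n.toList.length : Int)) = false := by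
          simp only [decide_eq_false_iff_not]; omega
        rw [this, Bool.false_and]
      rw [hfac]
      simp only [Bool.false_eq_true, if_false]
    · rw [if_neg h1]
      have hd : decide (min_length ≤ (n.toList.length : Int)) = true := by
        simp only [decide_eq_true_eq]; omega
      by_cases h2 : PySem.Chars.isIn (PySem.Chars.lower n.toList) d = true
      · rw [if_pos h2, ih, hd, h2]
        simp only [Bool.and_self, if_true, List.append_assoc, List.singleton_append]
      · rw [if_neg h2, ih, hd, Bool.true_and, Bool.eq_false_iff.mpr h2]
        simp only [Bool.false_eq_true, if_false]

-- the substring hash set contains x iff x occurs in d, whenever x's length is indexed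
theorem mem_subs_iff_isIn (d : List Char) (lensL : List Nat) (x : List Char)
    (hx : x.length ∈ lensL) :
    PySem.Set.contains (PySem.Set.ofList ((PySem.Set.ofList lensL).flatMap
      (fun L => (List.range (d.length - L + 1)).map (fun i => (d.drop i).take L)))) x
    = PySem.Chars.isIn x d := by
  rw [Bool.eq_iff_iff, PySem.Set.contains_iff, PySem.Set.mem_ofList, PySem.Chars.isIn_iff_infix,
    List.mem_flatMap]
  constructor
  · rintro ⟨L, _, hmem⟩
    rcases List.mem_map.mp hmem with ⟨i, _, rfl⟩
    exact ((List.take_prefix L (d.drop i)).isInfix).trans (List.drop_suffix i d).isInfix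
  · rintro ⟨s, t, rfl⟩
    refine ⟨x.length, (PySem.Set.mem_ofList lensL x.length).mpr hx, List.mem_map.mpr ⟨s.length, ?_, ?_⟩⟩
    · apply List.mem_range.mpr
      simp only [List.length_append]
      omega
    · rw [List.append_assoc, List.drop_left, List.take_left]

theorem lower_length (s : List Char) : (PySem.Chars.lower s).length = s.length := by
  simp [PySem.Chars.lower]

-- ===== VERDICT (by name: the statement is the Claim_ definition above) =====
theorem extract_from_definition_spec : Claim_equal_extract_from_definition := by
  intro definition kp_names min_length _
  unfold Spec_extract_from_definition extract_from_definition extract_from_definition_alt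
  by_cases hg : definition.toList = [] ∨ kp_names = []
  · rw [if_pos hg, if_pos hg]
  · rw [if_neg hg, if_neg hg]
    rw [extract_foldl_eq_filter, List.nil_append]
    apply List.filter_congr
    intro n hn
    by_cases h1 : (min_length ≤ (n.toList.length : Int))
    · have hd : decide (min_length ≤ (n.toList.length : Int)) = true := by
        simp only [decide_eq_true_eq]; exact h1
      rw [hd, Bool.true_and, Bool.true_and]
      rw [mem_subs_iff_isIn]
      rw [lower_length]
      refine List.mem_map.mpr ⟨n, List.mem_filter.mpr ⟨hn, hd⟩, rfl⟩
    · have hd : decide (min_length ≤ (n.toList.length : Int)) = false := by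
        simp only [decide_eq_false_iff_not]; exact h1
      rw [hd, Bool.false_and, Bool.false_and]
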